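-- pv_equiv track=rewrite | github.com/AndrewAltimit/template-repo | cgt-validator/src/parsers/requirements_parser.py | _classify_rule
-- ===== SOURCE A (Python) =====
-- def _classify_rule(rule_text: str) -> str:
--     """Classify the type of validation rule."""
--     rule_lower = rule_text.lower()
--
--     if any(keyword in rule_lower for keyword in ["format", "pattern"]):
--         return "format"
--     elif any(keyword in rule_lower for keyword in ["required", "mandatory"]):
--         return "required"
--     elif any(keyword in rule_lower for keyword in ["min", "max", "length", "size"]):
--         return "constraint"
--     elif any(keyword in rule_lower for keyword in ["valid", "allowed", "values"]):
--         return "allowed_values"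
--     else:
--         return "business"
-- ===== SOURCE B (Python) =====
-- _PRIORITY = (
--     ("format", "pattern"),
--     ("required", "mandatory"),
--     ("min", "max", "length", "size"),
--     ("valid", "allowed", "values"),
-- )
-- _CATEGORIES = ("format", "required", "constraint", "allowed_values", "business")
--
--
-- def _match_rank(text, i):
--     """Rank of the highest-priority keyword starting at position i (4 = none)."""
--     for rank, keywords in enumerate(_PRIORITY):
--         if text.startswith(keywords, i):
--             return rank
--     return 4
--
--
-- def _classify_rule(rule_text: str) -> str:
--     """Classify by a single left-to-right scan: at each position keep the best
--     (lowest) rank of any keyword starting there, then map the rank to its category."""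
--     text = rule_text.lower()
--     best = 4
--     for i in range(len(text)):
--         best = min(best, _match_rank(text, i))
--     return _CATEGORIES[best]
-- ===== Notes on version B (the rewrite author's own statement) =====
-- stated objective: alternative
-- what changed: Replaces four separate whole-string substring searches chained by if/elif with a single left-to-right scan of the text that, at each position, records the minimum priority rank of any keyword starting there (a naive multi-pattern matcher), then maps the best rank to its category.
import Mathlib
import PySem

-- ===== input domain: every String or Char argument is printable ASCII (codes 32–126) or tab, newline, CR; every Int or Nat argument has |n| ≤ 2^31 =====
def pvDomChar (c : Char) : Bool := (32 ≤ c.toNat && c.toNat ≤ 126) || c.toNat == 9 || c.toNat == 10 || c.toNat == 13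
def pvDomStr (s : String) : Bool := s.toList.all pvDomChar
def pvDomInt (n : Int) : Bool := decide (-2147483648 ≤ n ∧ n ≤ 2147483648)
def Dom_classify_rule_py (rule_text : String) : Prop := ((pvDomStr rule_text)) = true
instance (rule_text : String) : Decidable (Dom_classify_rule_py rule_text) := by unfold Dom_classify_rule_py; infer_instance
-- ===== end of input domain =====

-- B replaces A's four whole-string substring searches (if/elif cascade) by a single
-- left-to-right scan keeping the minimum keyword rank seen at any position; objective: alternative.

-- ===== PORT A =====
-- literal transliteration of A's cascade: lowercase once, then four any-membership tests in order
def classify_rule_py (rule_text : String) : String :=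
  let rule_lower := PySem.Str.lower rule_text
  if ["format", "pattern"].any (fun k => PySem.Str.isIn k rule_lower) then "format"
  else if ["required", "mandatory"].any (fun k => PySem.Str.isIn k rule_lower) then "required"
  else if ["min", "max", "length", "size"].any (fun k => PySem.Str.isIn k rule_lower) then "constraint"
  else if ["valid", "allowed", "values"].any (fun k => PySem.Str.isIn k rule_lower) then "allowed_values"
  else "business"

-- ===== PORT B =====
-- Source B's _match_rank(text, i): first rank whose keyword group has a member starting at this
-- position (text.startswith(keywords, i) on the suffix), 4 if none
def matchRank (cs : List Char) : Nat :=
  if ["format".toList, "pattern".toList].any (fun k => k.isPrefixOf cs) then 0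
  else if ["required".toList, "mandatory".toList].any (fun k => k.isPrefixOf cs) then 1
  else if ["min".toList, "max".toList, "length".toList, "size".toList].any (fun k => k.isPrefixOf cs) then 2
  else if ["valid".toList, "allowed".toList, "values".toList].any (fun k => k.isPrefixOf cs) then 3
  else 4

-- Source B's main loop: for each position i of the text, best = min(best, _match_rank(text, i))
def scanBest : List Char → Nat → Nat
  | [], best => best
  | c :: rest, best => scanBest rest (min best (matchRank (c :: rest)))

-- _CATEGORIES[best]
def classify_rule_py_alt (rule_text : String) : String :=
  ["format", "required", "constraint", "allowed_values", "business"].getD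
    (scanBest (PySem.Str.lower rule_text).toList 4) "business"

-- ===== PRECONDITION & SPEC =====
def Spec_classify_rule_py (rule_text : String) (out : String) : Prop := out = classify_rule_py_alt rule_text
instance (rule_text : String) (out : String) : Decidable (Spec_classify_rule_py rule_text out) := by unfold Spec_classify_rule_py; infer_instance

-- ===== CLAIM (what is proved, stated in full; the proofs are below) =====
def Claim_equal_classify_rule_py : Prop := ∀ (rule_text : String), Dom_classify_rule_py rule_text → Spec_classify_rule_py rule_text (classify_rule_py rule_text)

-- ===== LEMMAS AND PROOFS =====

-- first-match rank of four booleans (the shape of both matchRank and the infix chain)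
def chain4 (a0 a1 a2 a3 : Bool) : Nat :=
  if a0 then 0 else if a1 then 1 else if a2 then 2 else if a3 then 3 else 4

-- rank chain computed with whole-suffix infix tests (A's view of the same quantity)
def infChain (cs : List Char) : Nat :=
  chain4 (["format".toList, "pattern".toList].any (fun k => PySem.Chars.isIn k cs))
         (["required".toList, "mandatory".toList].any (fun k => PySem.Chars.isIn k cs))
         (["min".toList, "max".toList, "length".toList, "size".toList].any (fun k => PySem.Chars.isIn k cs))
         (["valid".toList, "allowed".toList, "values".toList].any (fun k => PySem.Chars.isIn k cs))

lemma isIn_cons_eq (k : List Char) (c : Char) (rest : List Char) :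
    PySem.Chars.isIn k (c :: rest) = (k.isPrefixOf (c :: rest) || PySem.Chars.isIn k rest) := by
  rw [Bool.eq_iff_iff]
  simp only [PySem.Chars.isIn_iff_infix, Bool.or_eq_true, List.isPrefixOf_iff_prefix]
  exact List.infix_cons_iff

lemma any_isIn_cons (kws : List (List Char)) (c : Char) (rest : List Char) :
    kws.any (fun k => PySem.Chars.isIn k (c :: rest)) =
      (kws.any (fun k => k.isPrefixOf (c :: rest)) || kws.any (fun k => PySem.Chars.isIn k rest)) := by
  induction kws with
  | nil => rfl
  | cons k ks ih =>
    rw [List.any_cons, List.any_cons, List.any_cons, ih, isIn_cons_eq]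
    cases k.isPrefixOf (c :: rest) <;> cases PySem.Chars.isIn k rest <;>
      cases ks.any (fun k => k.isPrefixOf (c :: rest)) <;>
      cases ks.any (fun k => PySem.Chars.isIn k rest) <;> rfl

lemma chain4_min (a0 a1 a2 a3 b0 b1 b2 b3 : Bool) :
    min (chain4 a0 a1 a2 a3) (chain4 b0 b1 b2 b3) =
      chain4 (a0 || b0) (a1 || b1) (a2 || b2) (a3 || b3) := by
  cases a0 <;> cases b0 <;> cases a1 <;> cases b1 <;> cases a2 <;> cases b2 <;> cases a3 <;> cases b3 <;> rfl

lemma chain4_le (a0 a1 a2 a3 : Bool) : chain4 a0 a1 a2 a3 ≤ 4 := by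
  cases a0 <;> cases a1 <;> cases a2 <;> cases a3 <;> decide

lemma matchRank_eq_chain4 (cs : List Char) :
    matchRank cs = chain4 (["format".toList, "pattern".toList].any (fun k => k.isPrefixOf cs))
      (["required".toList, "mandatory".toList].any (fun k => k.isPrefixOf cs))
      (["min".toList, "max".toList, "length".toList, "size".toList].any (fun k => k.isPrefixOf cs))
      (["valid".toList, "allowed".toList, "values".toList].any (fun k => k.isPrefixOf cs)) := rfl

lemma infChain_le (cs : List Char) : infChain cs ≤ 4 := chain4_le _ _ _ _

lemma scanBest_spec : ∀ (cs : List Char) (best : Nat), best ≤ 4 →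
    scanBest cs best = min best (infChain cs) := by
  intro cs
  induction cs with
  | nil =>
    intro best hb
    have h4 : infChain [] = 4 := by decide
    simp [scanBest, h4, Nat.min_eq_left hb]
  | cons c rest ih =>
    intro best hb
    have hle : min best (matchRank (c :: rest)) ≤ 4 := le_trans (Nat.min_le_left _ _) hb
    rw [scanBest, ih _ hle, Nat.min_assoc, matchRank_eq_chain4]
    unfold infChain
    rw [chain4_min]
    simp only [any_isIn_cons]

-- ===== VERDICT (by name: the statement is the Claim_ definition above) =====
theorem classify_rule_py_spec : Claim_equal_classify_rule_py := by
  intro rule_text _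
  unfold Spec_classify_rule_py classify_rule_py classify_rule_py_alt
  rw [scanBest_spec _ 4 (le_refl 4), Nat.min_eq_right (infChain_le _)]
  simp only [List.any_cons, List.any_nil, PySem.Str.isIn_eq, infChain, chain4]
  split_ifs <;> simp_all
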